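-- pv_equiv track=rewrite | github.com/YigalOrn/Afeka | Course Programming Languages/Python workPlace/תרגילי הגשה 2016/1/Ex_1/Ex_1.py | encrypt2
-- ===== SOURCE A (Python) =====
-- def encrypt2(myStr):
--     vowels = ["a","e","i","o","u"]
--     lstMystr = list(myStr)
--     i = 0
--     for ch in lstMystr[:] :
--         if vowels.count(ch) == 0 and ch != ' ':
--             lstMystr.insert(i, ch)
--             i+=2
--         else:
--             i+=1
--     return lstMystr
-- ===== SOURCE B (Python) =====
-- SKIP = set("aeiou ")
--
-- def encrypt2(myStr):
--     # one flat comprehension: expand each char to itself or its doubling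
--     return [c for ch in myStr for c in (ch if ch in SKIP else ch + ch)]
-- ===== Notes on version B (the rewrite author's own statement) =====
-- stated objective: idiomatic
-- what changed: Replaces A's in-place list mutation with insert-position bookkeeping by a single flat comprehension expanding each character to one or two copies.
import Mathlib
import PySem

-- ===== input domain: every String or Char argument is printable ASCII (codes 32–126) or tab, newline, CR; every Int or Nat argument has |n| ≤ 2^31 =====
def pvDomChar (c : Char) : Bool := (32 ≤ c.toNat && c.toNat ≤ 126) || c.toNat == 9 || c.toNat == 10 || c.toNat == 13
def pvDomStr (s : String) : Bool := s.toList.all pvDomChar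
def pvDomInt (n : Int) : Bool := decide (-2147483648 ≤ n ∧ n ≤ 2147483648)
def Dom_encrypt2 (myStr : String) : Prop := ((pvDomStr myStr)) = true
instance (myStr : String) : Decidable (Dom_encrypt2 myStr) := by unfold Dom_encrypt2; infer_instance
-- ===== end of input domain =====

-- B replaces A's in-place insertion with index bookkeeping by a flat expansion of each char.

-- ===== PORT A =====
-- loop body: state = (lstMystr, i); duplicate non-vowel non-space in place, advance i by 2 or 1
def encrypt2Step (st : List String × Int) (ch : String) : List String × Int :=
  if PySem.List.count ["a","e","i","o","u"] ch = 0 ∧ ch ≠ " " then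
    (PySem.List.insert st.1 st.2 ch, st.2 + 2)
  else
    (st.1, st.2 + 1)

def encrypt2 (myStr : String) : List String :=
  let lstMystr : List String := myStr.toList.map (fun c => String.ofList [c])
  (lstMystr.foldl encrypt2Step (lstMystr, 0)).1

-- ===== PORT B =====
def encrypt2_alt (myStr : String) : List String :=
  myStr.toList.flatMap (fun ch =>
    if ch ∈ ['a','e','i','o','u',' '] then [String.ofList [ch]]
    else [String.ofList [ch], String.ofList [ch]])

-- ===== PRECONDITION & SPEC =====
def Spec_encrypt2 (myStr : String) (out : List String) : Prop := out = encrypt2_alt myStr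
instance (myStr : String) (out : List String) : Decidable (Spec_encrypt2 myStr out) := by unfold Spec_encrypt2; infer_instance

-- ===== CLAIM (what is proved, stated in full; the proofs are below) =====
def Claim_equal_encrypt2 : Prop := ∀ (myStr : String), Dom_encrypt2 myStr → Spec_encrypt2 myStr (encrypt2 myStr)

-- ===== LEMMAS AND PROOFS =====

-- per-string expansion that A's loop performs on each element of the iterated copy
def encrypt2Exp (s : String) : List String :=
  if PySem.List.count ["a","e","i","o","u"] s = 0 ∧ s ≠ " " then [s, s] else [s]

lemma encrypt2_foldl_inv (r acc : List String) :
    (List.foldl encrypt2Step (acc ++ r, (acc.length : Int)) r).1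
      = acc ++ r.flatMap encrypt2Exp := by
  induction r generalizing acc with
  | nil => simp
  | cons ch r' ih =>
    rw [List.foldl_cons]
    by_cases h : PySem.List.count ["a","e","i","o","u"] ch = 0 ∧ ch ≠ " "
    · have hstep : encrypt2Step (acc ++ ch :: r', (acc.length : Int)) ch
          = ((acc ++ [ch, ch]) ++ r', (((acc ++ [ch, ch]).length : Nat) : Int)) := by
        simp only [encrypt2Step, if_pos h, Prod.mk.injEq]
        constructor
        · rw [PySem.List.insert_natCast (acc ++ ch :: r') acc.length ch (by simp)]
          simp
        · simp only [List.length_append, List.length_cons, List.length_nil]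
          push_cast
          ring
      rw [hstep, ih, List.flatMap_cons,
          show encrypt2Exp ch = [ch, ch] from by rw [encrypt2Exp, if_pos h]]
      simp
    · have hstep : encrypt2Step (acc ++ ch :: r', (acc.length : Int)) ch
          = ((acc ++ [ch]) ++ r', (((acc ++ [ch]).length : Nat) : Int)) := by
        simp only [encrypt2Step, if_neg h, Prod.mk.injEq]
        constructor
        · simp
        · simp only [List.length_append, List.length_cons, List.length_nil]
          push_cast
          ring
      rw [hstep, ih, List.flatMap_cons,
          show encrypt2Exp ch = [ch] from by rw [encrypt2Exp, if_neg h]]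
      simp
lemma encrypt2Exp_ofList (ch : Char) :
    encrypt2Exp (String.ofList [ch])
      = (if ch ∈ ['a','e','i','o','u',' '] then [String.ofList [ch]]
         else [String.ofList [ch], String.ofList [ch]]) := by
  by_cases h : ch ∈ ['a','e','i','o','u',' ']
  · rw [if_pos h]
    simp only [List.mem_cons, List.not_mem_nil, or_false] at h
    rcases h with h | h | h | h | h | h <;> subst h <;> decide
  · rw [if_neg h, encrypt2Exp, if_pos]
    simp only [List.mem_cons, List.not_mem_nil, or_false, not_or] at h
    obtain ⟨ha, he, hi, ho, hu, hsp⟩ := h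
    refine ⟨?_, ?_⟩
    · rw [PySem.List.count_eq, List.count_eq_zero]
      simp only [List.mem_cons, List.not_mem_nil, or_false, not_or]
      refine ⟨?_, ?_, ?_, ?_, ?_⟩ <;>
        · intro hs
          apply_fun String.toList at hs
          simp only [String.toList_ofList] at hs
          simp_all
    · intro hs
      apply_fun String.toList at hs
      simp only [String.toList_ofList] at hs
      simp_all

-- ===== VERDICT (by name: the statement is the Claim_ definition above) =====
theorem encrypt2_spec : Claim_equal_encrypt2 := by
  intro myStr _
  show encrypt2 myStr = encrypt2_alt myStr
  unfold encrypt2 encrypt2_alt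
  have h := encrypt2_foldl_inv (myStr.toList.map (fun c => String.ofList [c])) []
  simp only [List.nil_append, List.length_nil, Nat.cast_zero] at h
  rw [h, List.flatMap_map]
  exact List.flatMap_congr (fun ch _ => encrypt2Exp_ofList ch)
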